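-- pv_equiv track=rewrite | github.com/chithra-m/ds_code_snippets | course/nth_magical_number.py | solve
-- ===== SOURCE A (Python) =====
-- def solve(A):
--         total = 0
--         j = 1
--         while A >= 1:
--             if A & 1 == 1:
--                 total += 5 ** j
--             A = A >> 1
--             j += 1
--
--         return total
-- ===== SOURCE B (Python) =====
-- def solve(A):
--     if A < 1:
--         return 0
--     return 5 * int(bin(A)[2:], 5)
-- ===== Notes on version B (the rewrite author's own statement) =====
-- stated objective: idiomatic
-- what changed: Replaced the explicit bit loop maintaining a running power of 5 with a closed radix conversion: read A's binary representation as a base-5 numeral and multiply by 5.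
import Mathlib
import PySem

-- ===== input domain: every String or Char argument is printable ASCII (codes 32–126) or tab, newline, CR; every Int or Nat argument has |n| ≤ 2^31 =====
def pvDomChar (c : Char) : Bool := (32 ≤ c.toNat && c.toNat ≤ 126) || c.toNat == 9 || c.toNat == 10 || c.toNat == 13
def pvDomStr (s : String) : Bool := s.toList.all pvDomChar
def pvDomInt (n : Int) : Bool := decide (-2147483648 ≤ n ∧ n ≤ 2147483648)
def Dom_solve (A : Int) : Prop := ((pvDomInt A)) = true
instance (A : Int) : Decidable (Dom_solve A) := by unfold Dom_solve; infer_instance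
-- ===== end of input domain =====

-- B replaces A's bit-by-bit loop with a radix conversion (binary digits read in base 5,
-- shifted once by 5); objective: idiomatic, no explicit loop.

-- ===== PORT A =====
-- the while loop: state (A, total, j); `A >> 1` is `A >>> 1`, `A & 1` is PySem.Int.band A 1
def solveLoop (A : Int) (total : Int) (j : Nat) : Int :=
  if _h : A ≥ 1 then
    solveLoop (A >>> (1 : Nat))
      (if PySem.Int.band A 1 = 1 then total + 5 ^ j else total) (j + 1)
  else total
termination_by A.toNat
decreasing_by simp [Int.shiftRight_eq_div_pow]; omega

def solve (A : Int) : Int := solveLoop A 0 1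

-- ===== PORT B =====
-- `bin(A)[2:]` = A's binary digits MSB-first; `int(s, 5)` reads them base 5; ported via the
-- corresponding Lean library functions Nat.digits 2 (LSB-first) and Nat.ofDigits 5
-- (the two MSB-first reversals cancel, so the string stage is elided exactly).
def solve_alt (A : Int) : Int :=
  if A < 1 then 0
  else 5 * ((Nat.ofDigits 5 (Nat.digits 2 A.toNat) : Nat) : Int)

-- ===== PRECONDITION & SPEC =====
def Spec_solve (A : Int) (out : Int) : Prop := out = solve_alt A
instance (A : Int) (out : Int) : Decidable (Spec_solve A out) := by unfold Spec_solve; infer_instance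

-- ===== CLAIM (what is proved, stated in full; the proofs are below) =====
def Claim_equal_solve : Prop := ∀ (A : Int), Dom_solve A → Spec_solve A (solve A)

-- ===== LEMMAS AND PROOFS =====

-- Loop invariant: the loop adds 5 ^ j times the base-5 reading of A's binary digits.
theorem solveLoop_eq (A : Int) (total : Int) (j : Nat) :
    solveLoop A total j
      = total + 5 ^ j * ((Nat.ofDigits 5 (Nat.digits 2 A.toNat) : Nat) : Int) := by
  generalize hn : A.toNat = n
  induction n using Nat.strong_induction_on generalizing A total j with
  | _ n ih =>
    subst hn
    rw [solveLoop]
    by_cases h : A ≥ 1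
    · have hA : A = ((A.toNat : Nat) : Int) := by omega
      have hsh : (A >>> (1 : Nat)).toNat = A.toNat / 2 := by
        simp [Int.shiftRight_eq_div_pow]; omega
      have hband : (PySem.Int.band A 1 = 1) ↔ A.toNat % 2 = 1 := by
        rw [PySem.Int.band_one, PySem.Int.mod_eq_emod_of_pos (a := A) (by omega)]
        omega
      have hrec := ih (A.toNat / 2) (by omega) (A >>> (1 : Nat))
        (if PySem.Int.band A 1 = 1 then total + 5 ^ j else total) (j + 1) hsh
      rw [dif_pos h, hrec]
      have hd : Nat.digits 2 A.toNat
          = A.toNat % 2 :: Nat.digits 2 (A.toNat / 2) :=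
        Nat.digits_def' (by norm_num) (by omega)
      rw [hd, Nat.ofDigits_cons]
      by_cases hb : PySem.Int.band A 1 = 1
      · rw [if_pos hb]
        have h2 : A.toNat % 2 = 1 := hband.mp hb
        rw [h2]
        push_cast
        ring
      · rw [if_neg hb]
        have h2 : A.toNat % 2 = 0 := by
          have := hband; omega
        rw [h2]
        push_cast
        ring
    · rw [dif_neg h]
      have : A.toNat = 0 := by omega
      rw [this]
      simp

-- ===== VERDICT (by name: the statement is the Claim_ definition above) =====
theorem solve_spec : Claim_equal_solve := by
  intro A _
  unfold Spec_solve solve solve_alt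
  rw [solveLoop_eq]
  by_cases h : A < 1
  · rw [if_pos h]
    have : A.toNat = 0 := by omega
    simp [this]
  · rw [if_neg h]
    ring
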